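-- pv_equiv track=rewrite | github.com/a676-code/flattened-sierpinski | flattened_sierpinski_2.py | generate_flattened_sierpinski_2
-- ===== SOURCE A (Python) =====
-- def decimalToBinary(n):
--     digits = []
--     while n >= 1:
--         digits.append(n % 2)
--         if n % 2 == 1:
--             n = int((n - 1) / 2)
--         elif n % 2 == 0:
--             n = int(n / 2)
--     return digits
--
-- def overlap(a, b):
--     a_digits = decimalToBinary(a)
--     b_digits = decimalToBinary(b)
--
--     if len(a_digits) <= len(b_digits):
--         for i, d in enumerate(a_digits):
--             if d == 1 and b_digits[i] == 1:
--                 return True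
--     else:
--         for i, d in enumerate(b_digits):
--             if d == 1 and a_digits[i] == 1:
--                 return True
--     return False
--
-- def generate_flattened_sierpinski_2(n):
--     a = [0]
--     i = 2
--     while len(a) < n:
--         for x in reversed(range(i)):
--             if not overlap(x, i):
--                 a.append(x)
--         i += 1
--     return a
-- ===== SOURCE B (Python) =====
-- # B: per-round block generated by recursion on the bits of i (descending submasks of ~i
-- # below i's top bit) instead of scanning all of range(i) with a binary-digit overlap test.
-- def _subs(i, h):
--     # descending list of x in [0, 2**h) with x & i == 0
--     if h == 0:
--         return [0]
--     t = _subs(i, h - 1)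
--     if (i >> (h - 1)) & 1 == 0:
--         return [x + (1 << (h - 1)) for x in t] + t
--     return t
--
-- def generate_flattened_sierpinski_2(n):
--     a = [0]
--     i = 2
--     while len(a) < n:
--         a += _subs(i, i.bit_length() - 1)
--         i += 1
--     return a
-- ===== Notes on version B (the rewrite author's own statement) =====
-- stated objective: faster
-- what changed: Per round i, instead of scanning all of range(i) and testing each x for bit overlap via hand-rolled binary digit lists, B generates exactly the non-overlapping x (the descending submasks of the complement of i below i's top bit) by recursion on the bit positions, so work is proportional to the emitted elements.
import Mathlib
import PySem

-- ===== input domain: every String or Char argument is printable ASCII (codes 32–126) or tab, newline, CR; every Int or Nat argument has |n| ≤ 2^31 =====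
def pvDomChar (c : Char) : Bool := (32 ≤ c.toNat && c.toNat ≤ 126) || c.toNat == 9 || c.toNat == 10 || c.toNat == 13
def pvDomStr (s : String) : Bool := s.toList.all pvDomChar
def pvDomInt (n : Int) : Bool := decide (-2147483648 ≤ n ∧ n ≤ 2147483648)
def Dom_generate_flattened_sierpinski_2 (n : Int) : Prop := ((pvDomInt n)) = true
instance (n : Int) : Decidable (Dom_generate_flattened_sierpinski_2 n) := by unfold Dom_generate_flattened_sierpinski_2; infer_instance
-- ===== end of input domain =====

-- B replaces A's per-round scan of range(i) (with a digit-list overlap test) by a recursion on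
-- bit positions that emits exactly the non-overlapping values; measurably faster (asymptotic).

-- ===== PORT A =====
lemma pvDtbDec (n : Int) (h : 1 ≤ n) :
    (if PySem.Int.mod n 2 == 1 then PySem.Int.floordiv (n - 1) 2 else PySem.Int.floordiv n 2).toNat
      < n.toNat := by
  have h3 : PySem.Int.floordiv (n - 1) 2 = (n - 1) / 2 := PySem.Int.floordiv_eq_ediv_of_pos (by omega)
  have h4 : PySem.Int.floordiv n 2 = n / 2 := PySem.Int.floordiv_eq_ediv_of_pos (by omega)
  split <;> omega

-- the while loop of decimalToBinary; int((n-1)/2) and int(n/2) are exact halvings of the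
-- nonnegative even values they are applied to, ported as floordiv (exact there)
def decimalToBinary (n : Int) : List Int :=
  if h : 1 ≤ n then
    PySem.Int.mod n 2 ::
      decimalToBinary
        (if PySem.Int.mod n 2 == 1 then PySem.Int.floordiv (n - 1) 2 else PySem.Int.floordiv n 2)
  else []
termination_by n.toNat
decreasing_by exact pvDtbDec n h

-- ===== PRE-PORT LEMMAS (cited by the ports; tiny named proofs keep the definition bodies small) =====

-- the for-loop of overlap: index i into the longer list; at every call site i stays below the
-- shorter length ≤ the longer length, so pyGet? is always `some` and the getD default is unused
def overlapLoop (sh lo : List Int) (i : Int) : Bool :=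
  match sh with
  | [] => false
  | d :: rest =>
    if d == 1 && ((PySem.List.pyGet? lo i).getD 0) == 1 then true
    else overlapLoop rest lo (i + 1)

def overlap (a b : Int) : Bool :=
  let a_digits := decimalToBinary a
  let b_digits := decimalToBinary b
  if a_digits.length ≤ b_digits.length then overlapLoop a_digits b_digits 0
  else overlapLoop b_digits a_digits 0

-- the inner 'for x in reversed(range(i)): if not overlap(x, i): a.append(x)'
def sierRound (i : Int) (a : List Int) : List Int :=
  ((PySem.List.pyRange 0 i 1).reverse).foldl
    (fun acc x => if !(overlap x i) then acc ++ [x] else acc) a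

-- needed by sierGo's termination: every round appends at least x = 0
lemma overlap_zero_left (b : Int) : overlap 0 b = false := by
  have h0 : decimalToBinary 0 = [] := by rw [decimalToBinary]; norm_num
  simp [overlap, h0, overlapLoop]

lemma sierRound_shape (i : Int) (a : List Int) :
    sierRound i a = a ++ ((PySem.List.pyRange 0 i 1).reverse.filter (fun x => !overlap x i)) := by
  rw [sierRound]
  have h := PySem.List.foldl_append_if (fun x => !(overlap x i)) (fun x : Int => x)
    ((PySem.List.pyRange 0 i 1).reverse) a
  simpa using h

lemma length_lt_sierRound (i : Int) (hi : 1 ≤ i) (a : List Int) :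
    a.length < (sierRound i a).length := by
  rw [sierRound_shape]
  have h0 : (0 : Int) ∈ (PySem.List.pyRange 0 i 1).reverse.filter (fun x => !overlap x i) := by
    refine List.mem_filter.mpr ⟨List.mem_reverse.mpr ?_, by simp [overlap_zero_left]⟩
    exact PySem.List.mem_pyRange_one.mpr ⟨le_refl 0, by omega⟩
  have h1 := List.length_pos_of_mem h0
  simp only [List.length_append]
  omega

lemma pvOneLeSucc {i : Int} (hi : 1 ≤ i) : 1 ≤ i + 1 :=
  le_trans hi (Int.le_add_of_nonneg_right zero_le_one)

lemma pvSierDec (n : Int) (a : List Int) (i : Int) (hi : 1 ≤ i) (hc : (a.length : Int) < n) :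
    (n - ((sierRound i a).length : Int)).toNat < (n - (a.length : Int)).toNat := by
  have := length_lt_sierRound i hi a
  omega

def sierGo (n : Int) (a : List Int) (i : Int) (hi : 1 ≤ i) : List Int :=
  if hc : (a.length : Int) < n then sierGo n (sierRound i a) (i + 1) (pvOneLeSucc hi) else a
termination_by (n - a.length).toNat
decreasing_by exact pvSierDec n a i hi hc

def generate_flattened_sierpinski_2 (n : Int) : List Int := sierGo n [0] 2 one_le_two

-- ===== PORT B =====
-- _subs of Source B: descending list of x in [0, 2^h) with x & i == 0, by recursion on h
def subs (i : Int) (h : Nat) : List Int :=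
  match h with
  | 0 => [0]
  | g + 1 =>
    let t := subs i g
    if PySem.Int.band (i >>> g) 1 == 0 then t.map (fun x => x + ((1 : Int) <<< g)) ++ t else t

-- needed by sierGoB's termination: every round appends at least one element
lemma subs_ne_nil (i : Int) (g : Nat) : subs i g ≠ [] := by
  induction g with
  | zero => simp [subs]
  | succ g ih => simp only [subs]; split <;> simp [ih]

-- the while loop of B; i.bit_length() - 1 is PySem.Int.bitLength i - 1
lemma pvSierDecB (n : Int) (a : List Int) (i : Int) (hc : (a.length : Int) < n) :
    (n - ((a ++ subs i (PySem.Int.bitLength i - 1)).length : Int)).toNat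
      < (n - (a.length : Int)).toNat := by
  have h2 : 0 < (subs i (PySem.Int.bitLength i - 1)).length :=
    List.length_pos_iff.mpr (subs_ne_nil i (PySem.Int.bitLength i - 1))
  simp only [List.length_append]
  omega

def sierGoB (n : Int) (a : List Int) (i : Int) : List Int :=
  if hc : (a.length : Int) < n then
    sierGoB n (a ++ subs i (PySem.Int.bitLength i - 1)) (i + 1)
  else a
termination_by (n - a.length).toNat
decreasing_by exact pvSierDecB n a i hc

def generate_flattened_sierpinski_2_alt (n : Int) : List Int := sierGoB n [0] 2

-- ===== PRECONDITION & SPEC =====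
def Spec_generate_flattened_sierpinski_2 (n : Int) (out : List Int) : Prop := out = generate_flattened_sierpinski_2_alt n
instance (n : Int) (out : List Int) : Decidable (Spec_generate_flattened_sierpinski_2 n out) := by unfold Spec_generate_flattened_sierpinski_2; infer_instance

-- ===== CLAIM (what is proved, stated in full; the proofs are below) =====
def Claim_equal_generate_flattened_sierpinski_2 : Prop := ∀ (n : Int), Dom_generate_flattened_sierpinski_2 n → Spec_generate_flattened_sierpinski_2 n (generate_flattened_sierpinski_2 n)

-- ===== LEMMAS AND PROOFS =====

-- little-endian binary digits of a Nat, the value decimalToBinary computes on casts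
def bitsN (m : Nat) : List Nat :=
  if m = 0 then [] else m % 2 :: bitsN (m / 2)
termination_by m
decreasing_by exact Nat.div_lt_self (Nat.pos_of_ne_zero (by assumption)) Nat.one_lt_two

-- 'x and y share no 1-bit', by parallel halving
def disjB (x y : Nat) : Bool :=
  if x = 0 then true else (!(x % 2 == 1 && y % 2 == 1)) && disjB (x / 2) (y / 2)
termination_by x
decreasing_by exact Nat.div_lt_self (Nat.pos_of_ne_zero (by assumption)) Nat.one_lt_two

lemma disjB_zero_left (y : Nat) : disjB 0 y = true := by rw [disjB]; simp

lemma disjB_unfold (x y : Nat) :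
    disjB x y = ((!(x % 2 == 1 && y % 2 == 1)) && disjB (x / 2) (y / 2)) := by
  rw [disjB]
  split
  · next h => subst h; simp [disjB_zero_left]
  · rfl

lemma disjB_zero_right (x : Nat) : disjB x 0 = true := by
  induction x using Nat.strong_induction_on with
  | _ x ih =>
    rw [disjB_unfold]
    rcases Nat.eq_zero_or_pos x with hx | hx
    · subst hx; simp [disjB_zero_left]
    · simp [ih (x / 2) (Nat.div_lt_self hx (by omega))]

lemma disjB_comm (x y : Nat) : disjB x y = disjB y x := by
  induction x using Nat.strong_induction_on generalizing y with
  | _ x ih =>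
    rw [disjB_unfold x y, disjB_unfold y x]
    rcases Nat.eq_zero_or_pos x with hx | hx
    · subst hx; simp [disjB_zero_left, disjB_zero_right]
    · rw [ih (x / 2) (Nat.div_lt_self hx (by omega)) (y / 2)]
      simp [Bool.and_comm]

lemma bitsN_zero : bitsN 0 = [] := by rw [bitsN]; simp

-- scan of two digit lists for a common 1, the shape overlapLoop reduces to
def pairAny : List Int → List Int → Bool
  | [], _ => false
  | d :: ds, bs => (d == 1 && bs.headD 0 == 1) || pairAny ds bs.tail

lemma pairAny_nil_right (s : List Int) : pairAny s [] = false := by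
  induction s with
  | nil => rfl
  | cons d ds ih => simp [pairAny, ih]

lemma overlapLoop_eq_pairAny (s : List Int) : ∀ (l : List Int) (k : Nat),
    overlapLoop s l (k : Int) = pairAny s (l.drop k) := by
  induction s with
  | nil => intro l k; rfl
  | cons d ds ih =>
    intro l k
    have hg : (PySem.List.pyGet? l (k : Int)).getD 0 = (l.drop k).headD 0 := by
      rw [PySem.List.pyGet?_natCast, List.headD_eq_head?_getD, List.head?_drop]
    have hk : (k : Int) + 1 = ((k + 1 : Nat) : Int) := by push_cast; ring
    rw [overlapLoop, pairAny, hg, List.tail_drop, hk, ih l (k + 1)]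
    cases hcond : (d == 1 && (l.drop k).headD 0 == 1) <;> simp

lemma pairAny_bits (x : Nat) : ∀ (y : Nat),
    pairAny ((bitsN x).map Int.ofNat) ((bitsN y).map Int.ofNat)
      = !disjB x y := by
  induction x using Nat.strong_induction_on with
  | _ x ih =>
    intro y
    rcases Nat.eq_zero_or_pos x with hx | hx
    · subst hx; simp [bitsN_zero, pairAny, disjB_zero_left]
    · rw [bitsN]; simp only [if_neg (by omega : ¬ x = 0)]
      rcases Nat.eq_zero_or_pos y with hy | hy
      · subst hy; simp [bitsN_zero, pairAny_nil_right, disjB_zero_right]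
      · have hby : bitsN y = y % 2 :: bitsN (y / 2) := by
          rw [bitsN]; simp only [if_neg (by omega : ¬ y = 0)]
        rw [hby]
        simp only [List.map_cons, pairAny, List.headD_cons, List.tail_cons]
        rw [ih (x / 2) (Nat.div_lt_self hx (by omega)) (y / 2), disjB_unfold x y]
        have cx : (Int.ofNat (x % 2) == 1) = (x % 2 == 1) := by
          rcases Nat.mod_two_eq_zero_or_one x with h | h <;> simp [h]
        have cy : (Int.ofNat (y % 2) == 1) = (y % 2 == 1) := by
          rcases Nat.mod_two_eq_zero_or_one y with h | h <;> simp [h]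
        rw [cx, cy]
        cases (x % 2 == 1 && y % 2 == 1) <;> simp

lemma dtb_natCast (m : Nat) : decimalToBinary (m : Int) = (bitsN m).map Int.ofNat := by
  induction m using Nat.strong_induction_on with
  | _ m ih =>
    rcases Nat.eq_zero_or_pos m with hm | hm
    · subst hm; rw [decimalToBinary, bitsN]; norm_num
    · rw [decimalToBinary, bitsN]
      simp only [dif_pos (by exact_mod_cast hm : (1:Int) ≤ (m:Int)), if_neg (by omega : ¬ m = 0)]
      have hmod : PySem.Int.mod (m : Int) 2 = ((m % 2 : Nat) : Int) := PySem.Int.mod_natCast m 2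
      have ihm := ih (m / 2) (Nat.div_lt_self hm (by omega))
      rcases Nat.mod_two_eq_zero_or_one m with hp | hp
      · have : (PySem.Int.mod (m : Int) 2 == 1) = false := by rw [hmod, hp]; simp
        rw [this]
        simp only [Bool.false_eq_true, if_false]
        have : PySem.Int.floordiv (m : Int) 2 = ((m / 2 : Nat) : Int) := PySem.Int.floordiv_natCast m 2
        rw [this, ihm, hmod]
        simp
      · have : (PySem.Int.mod (m : Int) 2 == 1) = true := by rw [hmod, hp]; simp
        rw [this]
        simp only [if_true]
        have h1 : (m : Int) - 1 = ((m - 1 : Nat) : Int) := by omega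
        have h2 : PySem.Int.floordiv ((m - 1 : Nat) : Int) 2 = (((m - 1) / 2 : Nat) : Int) :=
          PySem.Int.floordiv_natCast (m - 1) 2
        have h3 : (m - 1) / 2 = m / 2 := by omega
        rw [h1, h2, h3, ihm, hmod]
        simp

lemma overlap_natCast (x y : Nat) : overlap (x : Int) (y : Int) = !disjB x y := by
  simp only [overlap, dtb_natCast]
  have h0 : (0 : Int) = ((0 : Nat) : Int) := rfl
  split
  · rw [h0, overlapLoop_eq_pairAny, List.drop_zero, pairAny_bits]
  · rw [h0, overlapLoop_eq_pairAny, List.drop_zero, pairAny_bits, disjB_comm]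

lemma disjB_two_pow_add (g : Nat) : ∀ (x i : Nat), x < 2 ^ g →
    disjB (2 ^ g + x) i = ((i / 2 ^ g % 2 == 0) && disjB x i) := by
  induction g with
  | zero =>
    intro x i hx
    interval_cases x
    rw [disjB_unfold]
    simp only [pow_zero, Nat.div_one]
    rcases Nat.mod_two_eq_zero_or_one i with h | h <;>
      simp [h, disjB_zero_left]
  | succ g ihg =>
    intro x i hx
    have hpow : 2 ^ (g + 1) = 2 * 2 ^ g := by ring
    rw [disjB_unfold (2 ^ (g + 1) + x) i, disjB_unfold x i]
    have e1 : (2 ^ (g + 1) + x) % 2 = x % 2 := by omega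
    have e2 : (2 ^ (g + 1) + x) / 2 = 2 ^ g + x / 2 := by omega
    rw [e1, e2, ihg (x / 2) (i / 2) (by omega)]
    have e3 : i / 2 / 2 ^ g = i / 2 ^ (g + 1) := by
      rw [Nat.div_div_eq_div_mul, ← hpow]
    rw [e3, Bool.and_left_comm]

lemma subs_spec (g : Nat) (i : Nat) :
    subs (i : Int) g
      = (((List.range (2 ^ g)).filter (fun x => disjB x i)).reverse).map Int.ofNat := by
  induction g with
  | zero => simp [subs, List.range_one, disjB_zero_left]
  | succ g ih =>
    have hcond : (PySem.Int.band ((i : Int) >>> g) 1 == 0) = (i / 2 ^ g % 2 == 0) := by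
      rw [show ((i : Int) >>> g) = (((i >>> g : Nat)) : Int) by simp [Int.natCast_shiftRight]]
      rw [show PySem.Int.band ((i >>> g : Nat) : Int) 1 = (((i >>> g) &&& 1 : Nat) : Int) from
        PySem.Int.band_natCast ..]
      rw [Nat.and_one_is_mod, Nat.shiftRight_eq_div_pow]
      have hm2 : i / 2 ^ g % 2 = 0 ∨ i / 2 ^ g % 2 = 1 := by omega
      rcases hm2 with h | h <;> simp [h]
    have hsplit : (2 : Nat) ^ (g + 1) = 2 ^ g + 2 ^ g := by ring
    have hupper : ((List.range (2 ^ g)).map (fun x => 2 ^ g + x)).filter (fun x => disjB x i)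
        = ((List.range (2 ^ g)).filter (fun x => (i / 2 ^ g % 2 == 0) && disjB x i)).map
            (fun x => 2 ^ g + x) := by
      rw [List.filter_map]
      congr 1
      apply List.filter_congr
      intro x hxm
      have hx : x < 2 ^ g := List.mem_range.mp hxm
      simpa using disjB_two_pow_add g x i hx
    rw [hsplit, List.range_add, List.filter_append, hupper]
    simp only [subs, hcond]
    cases hb : (i / 2 ^ g % 2 == 0) with
    | true =>
      simp only [if_true, Bool.true_and]
      rw [ih, List.reverse_append, List.map_append]
      congr 1
      rw [← List.map_reverse, List.map_map, List.map_map]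
      apply List.map_congr_left
      intro x hx
      simp only [Function.comp_apply]
      rw [show (1 : Int) <<< g = 2 ^ g from by rw [Int.shiftLeft_eq]; ring]
      simp only [Int.ofNat_eq_natCast]
      push_cast
      ring
    | false =>
      rw [ih]
      simp [Bool.false_and]

lemma filter_range_top (i : Nat) (h2 : 2 ≤ i) :
    (List.range i).filter (fun x => disjB x i)
      = (List.range (2 ^ (PySem.Int.bitLength (i : Int) - 1))).filter (fun x => disjB x i) := by
  set h := PySem.Int.bitLength (i : Int) - 1 with hh
  have hne : (i : Int) ≠ 0 := by exact_mod_cast (by omega : i ≠ 0)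
  have hle : 2 ^ h ≤ i := by
    have := PySem.Int.two_pow_bitLength_le (i : Int) hne
    simpa [hh] using this
  have hb1 : 1 ≤ PySem.Int.bitLength (i : Int) := by
    by_contra hcon
    have h0 : PySem.Int.bitLength (i : Int) = 0 := by omega
    have := PySem.Int.lt_two_pow_bitLength (i : Int)
    rw [h0] at this
    simp at this
    omega
  have hlt : i < 2 ^ (h + 1) := by
    have := PySem.Int.lt_two_pow_bitLength (i : Int)
    have : i < 2 ^ PySem.Int.bitLength (i : Int) := by simpa using this
    have he : h + 1 = PySem.Int.bitLength (i : Int) := by omega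
    rw [he]
    exact this
  have hsplit : List.range i = List.range (2 ^ h + (i - 2 ^ h)) := by
    congr 1
    omega
  rw [hsplit, List.range_add, List.filter_append]
  have hzero : ((List.range (i - 2 ^ h)).map (fun x => 2 ^ h + x)).filter
      (fun x => disjB x i) = [] := by
    rw [List.filter_eq_nil_iff]
    intro x hx
    obtain ⟨x', hx', rfl⟩ := List.mem_map.mp hx
    have hx'' : x' < 2 ^ h := by
      have := List.mem_range.mp hx'
      have : i < 2 ^ h + 2 ^ h := by
        have : 2 ^ (h + 1) = 2 ^ h + 2 ^ h := by ring
        omega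
      omega
    rw [disjB_two_pow_add h x' i hx'']
    have hdiv : i / 2 ^ h = 1 := by
      apply Nat.div_eq_of_lt_le
      · omega
      · have : 2 ^ (h + 1) = 2 ^ h + 2 ^ h := by ring
        omega
    simp [hdiv]
  rw [hzero, List.append_nil]

lemma pyRange_cast (i : Nat) :
    PySem.List.pyRange 0 (i : Int) 1 = (List.range i).map Int.ofNat := by
  simp [PySem.List.pyRange_zero_natCast, Int.ofNat_eq_natCast]

lemma sierRound_eq (i : Nat) (h2 : 2 ≤ i) (a : List Int) :
    sierRound (i : Int) a = a ++ subs (i : Int) (PySem.Int.bitLength (i : Int) - 1) := by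
  rw [sierRound_shape, pyRange_cast]
  congr 1
  rw [← List.map_reverse, List.filter_map]
  have hpred : ((fun x => !overlap x (i : Int)) ∘ Int.ofNat) = fun x : Nat => disjB x i := by
    funext x
    simp [Function.comp, Int.ofNat_eq_natCast, overlap_natCast x i]
  rw [hpred, List.filter_reverse, filter_range_top i h2]
  exact (subs_spec (PySem.Int.bitLength (i : Int) - 1) i).symm

lemma sierGo_cast (n : Int) (a : List Int) (i i' : Int) (h : i = i') (h1 : 1 ≤ i) :
    sierGo n a i h1 = sierGo n a i' (h ▸ h1) := by subst h; rfl

lemma go_eq (n : Int) : ∀ (m : Nat) (a : List Int) (i : Nat), 2 ≤ i → (n - a.length).toNat = m →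
    ∀ (h1 : (1 : Int) ≤ (i : Int)), sierGo n a (i : Int) h1 = sierGoB n a (i : Int) := by
  intro m
  induction m using Nat.strong_induction_on with
  | _ m ih =>
    intro a i hi hm h1
    rw [sierGo, sierGoB]
    split
    · next hc =>
      rw [sierRound_eq i hi a]
      have hlen : a.length < (a ++ subs (i : Int) (PySem.Int.bitLength (i : Int) - 1)).length := by
        have := List.length_pos_iff.mpr (subs_ne_nil (i : Int) (PySem.Int.bitLength (i : Int) - 1))
        simp only [List.length_append]
        omega
      have hcast : ((i : Int) + 1) = ((i + 1 : Nat) : Int) := by push_cast; ring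
      refine (sierGo_cast n _ _ _ hcast _).trans ?_
      exact ih ((n - ((a ++ subs (i : Int) (PySem.Int.bitLength (i : Int) - 1)).length : Int)).toNat)
        (by omega) _ (i + 1) (by omega) rfl _
    · rfl

-- ===== VERDICT (by name: the statement is the Claim_ definition above) =====
theorem generate_flattened_sierpinski_2_spec : Claim_equal_generate_flattened_sierpinski_2 := by
  intro n _
  unfold Spec_generate_flattened_sierpinski_2 generate_flattened_sierpinski_2
    generate_flattened_sierpinski_2_alt
  exact go_eq n ((n - (([0] : List Int).length : Int)).toNat) [0] 2 (by omega) rfl (by norm_num)
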